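-- pv_equiv track=rewrite | github.com/tysjosh/job-matching-contrastive-learning | augmentation/downward_transformer.py | _reduce_impact
-- ===== SOURCE A (Python) =====
-- from typing import Dict, List, Any, Optional
--
-- def _reduce_impact(impact: List[str], target_level: str) -> List[str]:
--     """Reduce impact descriptions to individual contribution"""
--     reduced = []
--     for impact_item in impact:
--         if target_level == 'entry':
--             # Focus on individual learning and contribution
--             reduced.append(f"Contributed to {impact_item.lower()}")
--         elif target_level == 'mid':
--             # Focus on team-level contribution
--             reduced.append(f"Helped achieve {impact_item.lower()}")
--         else:
--             reduced.append(impact_item)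
--
--     return reduced
-- ===== SOURCE B (Python) =====
-- def _prefixed(prefix, items):
--     """Recursively build [prefix + items[0].lower()] :: rest."""
--     if not items:
--         return []
--     return [prefix + items[0].lower()] + _prefixed(prefix, items[1:])
--
-- def _reduce_impact(impact, target_level):
--     """Reduce impact descriptions to individual contribution"""
--     if target_level == 'entry':
--         return _prefixed('Contributed to ', impact)
--     if target_level == 'mid':
--         return _prefixed('Helped achieve ', impact)
--     return list(impact)
-- ===== Notes on version B (the rewrite author's own statement) =====
-- stated objective: alternative
-- what changed: B replaces A's single accumulator loop that re-tests target_level per item with an early-return dispatch on the mode and a structurally recursive helper that conses each prefixed lowered item onto the recursion over the tail (or copies the list verbatim in the default case).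
import Mathlib
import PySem

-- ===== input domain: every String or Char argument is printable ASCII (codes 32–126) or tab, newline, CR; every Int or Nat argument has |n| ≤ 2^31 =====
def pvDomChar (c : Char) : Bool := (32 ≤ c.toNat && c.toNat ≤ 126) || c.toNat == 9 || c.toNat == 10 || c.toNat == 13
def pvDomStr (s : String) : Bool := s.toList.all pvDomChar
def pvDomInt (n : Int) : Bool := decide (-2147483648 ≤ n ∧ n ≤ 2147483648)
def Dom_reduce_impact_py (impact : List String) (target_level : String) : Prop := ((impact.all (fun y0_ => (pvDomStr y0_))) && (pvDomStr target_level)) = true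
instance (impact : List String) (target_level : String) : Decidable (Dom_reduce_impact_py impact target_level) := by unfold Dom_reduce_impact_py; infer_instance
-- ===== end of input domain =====

-- B: early-return dispatch on the mode plus a structurally recursive helper, instead of A's accumulator loop re-testing the mode per item (alternative decomposition, same cost).
-- ===== PORT A =====
def reduce_impact_py (impact : List String) (target_level : String) : List String :=
  impact.foldl (fun reduced impact_item =>
    if target_level = "entry" then
      reduced ++ ["Contributed to " ++ PySem.Str.lower impact_item]
    else if target_level = "mid" then
      reduced ++ ["Helped achieve " ++ PySem.Str.lower impact_item]
    else
      reduced ++ [impact_item]) []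

-- ===== PORT B =====
def pvPrefixed (prefx : String) : List String → List String
  | [] => []
  | x :: xs => (prefx ++ PySem.Str.lower x) :: pvPrefixed prefx xs

def reduce_impact_py_alt (impact : List String) (target_level : String) : List String :=
  if target_level = "entry" then pvPrefixed "Contributed to " impact
  else if target_level = "mid" then pvPrefixed "Helped achieve " impact
  else impact

-- ===== PRECONDITION & SPEC =====
def Spec_reduce_impact_py (impact : List String) (target_level : String) (out : List String) : Prop := out = reduce_impact_py_alt impact target_level
instance (impact : List String) (target_level : String) (out : List String) : Decidable (Spec_reduce_impact_py impact target_level out) := by unfold Spec_reduce_impact_py; infer_instance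

-- ===== CLAIM (what is proved, stated in full; the proofs are below) =====
def Claim_equal_reduce_impact_py : Prop := ∀ (impact : List String) (target_level : String), Dom_reduce_impact_py impact target_level → Spec_reduce_impact_py impact target_level (reduce_impact_py impact target_level)

-- ===== LEMMAS AND PROOFS =====
theorem pvPrefixed_eq_map (prefx : String) (l : List String) :
    pvPrefixed prefx l = l.map (fun x => prefx ++ PySem.Str.lower x) := by
  induction l with
  | nil => rfl
  | cons a l ih => simp [pvPrefixed, ih]

theorem pv_foldl_snoc (f : String → String) (l acc : List String) :
    l.foldl (fun r x => r ++ [f x]) acc = acc ++ l.map f := by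
  induction l generalizing acc with
  | nil => simp
  | cons a l ih => simp [ih]

-- ===== VERDICT (by name: the statement is the Claim_ definition above) =====
theorem reduce_impact_py_spec : Claim_equal_reduce_impact_py := by
  intro impact target_level _
  unfold Spec_reduce_impact_py reduce_impact_py reduce_impact_py_alt
  by_cases h1 : target_level = "entry"
  · simpa [h1, pvPrefixed_eq_map] using
      pv_foldl_snoc (fun x => "Contributed to " ++ PySem.Str.lower x) impact []
  · by_cases h2 : target_level = "mid"
    · simpa [h1, h2, pvPrefixed_eq_map] using
        pv_foldl_snoc (fun x => "Helped achieve " ++ PySem.Str.lower x) impact []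
    · simpa [h1, h2] using pv_foldl_snoc (fun x => x) impact []
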